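-- pv_equiv track=rewrite | github.com/eastmeet/pmp | 백준/Bronze/3003. 킹， 퀸， 룩， 비숍， 나이트， 폰/킹， 퀸， 룩， 비숍， 나이트， 폰.py | countKingQueen
-- ===== SOURCE A (Python) =====
-- def countKingQueen(object):
-- 	num = 0
-- 	if object == 1:
-- 		return num
--
-- 	while object != 1:
-- 		if object > 1:
-- 			object = object - 1
-- 			num = num - 1
-- 		else:
-- 			object = object + 1
-- 			num = num + 1
-- 	return num
-- ===== SOURCE B (Python) =====
-- def countKingQueen(object):
--     return 1 - object
-- ===== Notes on version B (the rewrite author's own statement) =====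
-- stated objective: faster
-- what changed: Replaced the unit-step while loop that walks object towards 1 with the closed form 1 - object.
import Mathlib
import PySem

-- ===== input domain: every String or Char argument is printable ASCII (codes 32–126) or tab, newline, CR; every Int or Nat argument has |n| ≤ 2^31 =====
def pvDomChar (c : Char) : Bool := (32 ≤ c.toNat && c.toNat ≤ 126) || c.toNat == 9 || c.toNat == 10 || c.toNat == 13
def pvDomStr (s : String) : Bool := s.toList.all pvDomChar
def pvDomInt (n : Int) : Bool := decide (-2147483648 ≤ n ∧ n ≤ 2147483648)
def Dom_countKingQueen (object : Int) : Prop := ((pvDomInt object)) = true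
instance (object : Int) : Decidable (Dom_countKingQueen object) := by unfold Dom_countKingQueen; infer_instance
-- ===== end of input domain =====

-- B replaces A's unit-step while loop with the closed form 1 - object (faster).

-- ===== PORT A =====
-- while object != 1: step object towards 1 by 1, adjusting num oppositely
def countKingQueenLoop (object num : Int) : Int :=
  if object = 1 then num
  else if object > 1 then countKingQueenLoop (object - 1) (num - 1)
  else countKingQueenLoop (object + 1) (num + 1)
  termination_by (object - 1).natAbs
  decreasing_by
  · omega
  · omega

def countKingQueen (object : Int) : Int :=
  if object = 1 then 0 else countKingQueenLoop object 0

-- ===== PORT B =====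
def countKingQueen_alt (object : Int) : Int := 1 - object

-- ===== PRECONDITION & SPEC =====
def Spec_countKingQueen (object : Int) (out : Int) : Prop := out = countKingQueen_alt object
instance (object : Int) (out : Int) : Decidable (Spec_countKingQueen object out) := by unfold Spec_countKingQueen; infer_instance

-- ===== CLAIM (what is proved, stated in full; the proofs are below) =====
def Claim_equal_countKingQueen : Prop := ∀ (object : Int), Dom_countKingQueen object → Spec_countKingQueen object (countKingQueen object)

-- ===== LEMMAS AND PROOFS =====
theorem countKingQueenLoop_eq (object num : Int) :
    countKingQueenLoop object num = num + (1 - object) := by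
  induction object, num using countKingQueenLoop.induct
  all_goals rw [countKingQueenLoop]
  all_goals simp_all
  all_goals omega

-- ===== VERDICT (by name: the statement is the Claim_ definition above) =====
theorem countKingQueen_spec : Claim_equal_countKingQueen := by
  intro object _
  unfold Spec_countKingQueen countKingQueen countKingQueen_alt
  split
  · omega
  · rw [countKingQueenLoop_eq]; omega
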